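-- pv_equiv track=rewrite | github.com/theparisa/Design-of-Algorithms-Course | Project 4/P3.py | solve_small_n
-- ===== SOURCE A (Python) =====
-- class DSU:
--     def __init__(self, size):
--         self.parent = list(range(size))
--         self.rank = [0] * size
--
--     def find(self, i):
--         if self.parent[i] == i:
--             return i
--         self.parent[i] = self.find(self.parent[i])
--         return self.parent[i]
--
--     def union(self, i, j):
--         root_i = self.find(i)
--         root_j = self.find(j)
--         if root_i != root_j:
--             if self.rank[root_i] > self.rank[root_j]:
--                 self.parent[root_j] = root_i
--             else:
--                 self.parent[root_i] = root_j
--                 if self.rank[root_i] == self.rank[root_j]: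
--                     self.rank[root_j] += 1
--             return True
--         return False
--
-- def solve_small_n(n, edges):
--     edge_objects = [type('Edge', (), {'u': u, 'v': v, 'w': w, 'idx': i}) for i, (u, v, w) in enumerate(edges)]
--     edge_objects.sort(key=lambda e: e.w)
--
--     # Runs Kruskal's
--     dsu = DSU(n)
--     mst_edges = []
--     mst_weight = 0
--     adj_list = [[] for _ in range(n)]
--     for e in edge_objects:
--         if dsu.union(e.u, e.v):
--             mst_edges.append(e)
--             mst_weight += e.w
--             adj_list[e.u].append((e.v, e.w))
--             adj_list[e.v].append((e.u, e.w))
--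
--     answers = ["none"] * len(edges)
--
--     for e in edge_objects:
--         # (node, parent, max_edge_on_path)
--         q = [(e.u, -1, -1)]
--         visited = {e.u}
--         max_w = -1
--
--         # Find max edge on path from u to v in the MST
--         head = 0
--         while head < len(q):
--             curr, p, path_max = q[head]
--             head += 1
--             if curr == e.v:
--                 max_w = path_max
--                 break
--             for neighbor, weight in adj_list[curr]:
--                 if neighbor != p:
--                     visited.add(neighbor)
--                     q.append((neighbor, curr, max(path_max, weight)))
--
--         if e.w == max_w:
--             answers[e.idx] = "at least one"
--
--     for e in mst_edges:
--         temp_dsu = DSU(n)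
--         temp_weight = 0
--         num_edges = 0
--         for other_e in edge_objects:
--             if e.idx != other_e.idx:
--                 if temp_dsu.union(other_e.u, other_e.v):
--                     temp_weight += other_e.w
--                     num_edges += 1
--
--         if num_edges < n - 1 or temp_weight > mst_weight:
--             answers[e.idx] = "any"
--
--     return answers
-- ===== SOURCE B (Python) =====
-- from collections import deque
--
-- def solve_small_n(n, edges):
--     order = sorted([(u, v, w, i) for i, (u, v, w) in enumerate(edges)], key=lambda t: t[2])
--
--     def kruskal(items):
--         comp = list(range(n))
--         total = 0
--         count = 0
--         chosen = []
--         for (u, v, w, i) in items: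
--             cu, cv = comp[u], comp[v]
--             if cu != cv:
--                 comp = [cu if c == cv else c for c in comp]
--                 total += w
--                 count += 1
--                 chosen.append((u, v, w, i))
--         return total, count, chosen
--
--     base_w, _, tree = kruskal(order)
--     tree_idx = set(i for (_, _, _, i) in tree)
--
--     adj = [[] for _ in range(n)]
--     for (u, v, w, i) in tree:
--         adj[u].append((v, w))
--         adj[v].append((u, w))
--
--     def path_max(src, dst):
--         queue = deque([(src, -1, -1)])
--         while queue:
--             curr, par, pm = queue.popleft()
--             if curr == dst:
--                 return pm
--             queue.extend([(nb, curr, max(pm, wt)) for nb, wt in adj[curr] if nb != par])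
--         return -1
--
--     def label(u, v, w, i):
--         if i in tree_idx:
--             w2, c2, _ = kruskal([t for t in order if t[3] != i])
--             if c2 < n - 1 or w2 > base_w:
--                 return "any"
--         if w == path_max(u, v):
--             return "at least one"
--         return "none"
--
--     return [label(u, v, w, i) for i, (u, v, w) in enumerate(edges)]
-- ===== Notes on version B (the rewrite author's own statement) =====
-- stated objective: simpler
-- what changed: Replaces the recursive path-compressing union-by-rank DSU class with a flat component-label array merged by relabelling, factors Kruskal into one helper reused for the base run and every leave-one-out test, swaps the head-indexed growing-list BFS with a dead 'visited' set for a plain deque BFS, and builds the answer by direct per-edge classification instead of A's two in-place mutation passes over a preallocated answers array.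
-- outside the precondition, e.g. on solve_small_n(2, [(-1, 0, 1)]): A returns ['any'], B returns ['any']
import Mathlib
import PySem

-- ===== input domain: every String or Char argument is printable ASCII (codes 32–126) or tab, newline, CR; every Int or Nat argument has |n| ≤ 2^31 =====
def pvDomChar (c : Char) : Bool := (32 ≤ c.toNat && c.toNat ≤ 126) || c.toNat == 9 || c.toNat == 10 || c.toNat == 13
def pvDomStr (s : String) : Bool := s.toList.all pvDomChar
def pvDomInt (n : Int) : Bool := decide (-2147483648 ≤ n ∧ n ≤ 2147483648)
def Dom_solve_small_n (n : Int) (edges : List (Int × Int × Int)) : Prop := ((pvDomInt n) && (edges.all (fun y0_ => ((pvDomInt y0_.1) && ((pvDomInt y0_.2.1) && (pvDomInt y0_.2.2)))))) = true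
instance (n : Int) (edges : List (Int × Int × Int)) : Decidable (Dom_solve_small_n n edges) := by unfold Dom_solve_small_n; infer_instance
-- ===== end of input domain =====

-- B replaces A's recursive path-compressing union-by-rank DSU by a flat component-label
-- array, reuses one Kruskal helper for the base run and every leave-one-out test, uses a
-- plain dequeue BFS instead of A's head-indexed growing list, and builds the output by
-- per-edge classification instead of two mutation passes (objective: simpler).

-- ===== PORT A =====

-- DSU.find with path compression (recursion made structural on a fuel counter that the
-- proofs show is never exhausted on admitted inputs)
def pvFindA (fuel : Nat) (parent : List Int) (i : Int) : List Int × Int :=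
  match fuel with
  | 0 => (parent, i)
  | fuel+1 =>
    if PySem.List.pyGetD parent i 0 = i then (parent, i)
    else
      let r := pvFindA fuel parent (PySem.List.pyGetD parent i 0)
      (PySem.List.pySetD r.1 i r.2, r.2)

-- DSU.union; returns ((parent, rank), merged?)
def pvUnionA (fuel : Nat) (parent rank : List Int) (i j : Int) :
    (List Int × List Int) × Bool :=
  let f1 := pvFindA fuel parent i
  let f2 := pvFindA fuel f1.1 j
  let rootI := f1.2
  let rootJ := f2.2
  let parent2 := f2.1
  if rootI ≠ rootJ then
    if PySem.List.pyGetD rank rootI 0 > PySem.List.pyGetD rank rootJ 0 then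
      ((PySem.List.pySetD parent2 rootJ rootI, rank), true)
    else
      ((PySem.List.pySetD parent2 rootI rootJ,
        if PySem.List.pyGetD rank rootI 0 = PySem.List.pyGetD rank rootJ 0 then
          PySem.List.pySetD rank rootJ (PySem.List.pyGetD rank rootJ 0 + 1)
        else rank), true)
  else ((parent2, rank), false)

-- adj_list[u].append((v, w)); adj_list[v].append((u, w))  (identical line in Source B)
def pvAdjStep (adj : List (List (Int × Int))) (e : Int × Int × Int × Int) :
    List (List (Int × Int)) :=
  let adj1 := PySem.List.pySetD adj e.1 (PySem.List.pyGetD adj e.1 [] ++ [(e.2.1, e.2.2.1)])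
  PySem.List.pySetD adj1 e.2.1 (PySem.List.pyGetD adj1 e.2.1 [] ++ [(e.1, e.2.2.1)])

-- body of A's Kruskal loop; state = (parent, rank, mst_edges, mst_weight, adj_list)
def pvStepA (fuel : Nat)
    (st : List Int × List Int × List (Int × Int × Int × Int) × Int × List (List (Int × Int)))
    (e : Int × Int × Int × Int) :
    List Int × List Int × List (Int × Int × Int × Int) × Int × List (List (Int × Int)) :=
  let u := pvUnionA fuel st.1 st.2.1 e.1 e.2.1
  if u.2 then
    (u.1.1, u.1.2, st.2.2.1 ++ [e], st.2.2.2.1 + e.2.2.1, pvAdjStep st.2.2.2.2 e)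
  else
    (u.1.1, u.1.2, st.2.2.1, st.2.2.2.1, st.2.2.2.2)

-- A's BFS loop: q with a head pointer, dead 'visited' set; returns max_w (-1 when the
-- loop drains or fuel runs out; fuel is never exhausted on admitted inputs)
def pvBfsA (adj : List (List (Int × Int))) (target : Int) :
    Nat → List (Int × Int × Int) → Int → PySem.Set Int → Int
  | 0, _, _, _ => -1
  | fuel+1, q, head, visited =>
    if head < (q.length : Int) then
      let e := PySem.List.pyGetD q head (0, 0, 0)
      if e.1 = target then e.2.2
      else
        let st := (PySem.List.pyGetD adj e.1 []).foldl
          (fun (s : PySem.Set Int × List (Int × Int × Int)) nb =>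
            if nb.1 ≠ e.2.1 then
              (PySem.Set.add s.1 nb.1, s.2 ++ [(nb.1, e.1, max e.2.2 nb.2)])
            else s)
          (visited, q)
        pvBfsA adj target fuel st.2 (head + 1) st.1
    else -1

-- body of A's leave-one-out Kruskal rerun; state = ((parent, rank), temp_weight, num_edges)
def pvStepA3Body (fuel : Nat)
    (acc : (List Int × List Int) × Int × Int) (oe : Int × Int × Int × Int) :
    (List Int × List Int) × Int × Int :=
  let u := pvUnionA fuel acc.1.1 acc.1.2 oe.1 oe.2.1
  if u.2 then ((u.1.1, u.1.2), acc.2.1 + oe.2.2.1, acc.2.2 + 1)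
  else ((u.1.1, u.1.2), acc.2.1, acc.2.2)

def pvStepA3 (fuel : Nat) (i : Int)
    (acc : (List Int × List Int) × Int × Int) (oe : Int × Int × Int × Int) :
    (List Int × List Int) × Int × Int :=
  if i ≠ oe.2.2.2 then pvStepA3Body fuel acc oe else acc

def solve_small_n (n : Int) (edges : List (Int × Int × Int)) : List String :=
  let edgeObjects : List (Int × Int × Int × Int) :=
    PySem.List.sorted
      ((PySem.List.enumerate edges).map (fun p => (p.2.1, p.2.2.1, p.2.2.2, p.1)))
      (fun e => e.2.2.1) false
  let fuel := n.toNat + edges.length + 1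
  let st := edgeObjects.foldl (pvStepA fuel)
      (PySem.List.pyRange 0 n, PySem.List.pyRepeat [(0 : Int)] n, [], 0,
       (PySem.List.pyRange 0 n).map (fun _ => []))
  let mstEdges := st.2.2.1
  let mstWeight := st.2.2.2.1
  let adj := st.2.2.2.2
  let bfsFuel := n.toNat + 2 * edges.length + 5
  let answers : List String := PySem.List.pyRepeat ["none"] (edges.length : Int)
  let answers := edgeObjects.foldl (fun ans e =>
      let maxw := pvBfsA adj e.2.1 bfsFuel [(e.1, -1, -1)] 0 (PySem.Set.ofList [e.1])
      if e.2.2.1 = maxw then PySem.List.pySetD ans e.2.2.2 "at least one" else ans) answers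
  let answers := mstEdges.foldl (fun ans e =>
      let r := edgeObjects.foldl (pvStepA3 fuel e.2.2.2)
          ((PySem.List.pyRange 0 n, PySem.List.pyRepeat [(0 : Int)] n), 0, 0)
      if r.2.2 < n - 1 ∨ r.2.1 > mstWeight then PySem.List.pySetD ans e.2.2.2 "any" else ans)
    answers
  answers

-- ===== PORT B =====

-- body of B's kruskal loop; state = (comp, total, count, chosen)
def pvStepB (st : List Int × Int × Int × List (Int × Int × Int × Int))
    (t : Int × Int × Int × Int) : List Int × Int × Int × List (Int × Int × Int × Int) :=
  let cu := PySem.List.pyGetD st.1 t.1 0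
  let cv := PySem.List.pyGetD st.1 t.2.1 0
  if cu ≠ cv then
    (st.1.map (fun c => if c = cv then cu else c),
     st.2.1 + t.2.2.1, st.2.2.1 + 1, st.2.2.2 ++ [t])
  else st

-- B's kruskal(items): component-label union-find; returns (total, count, chosen)
def pvKruskalB (n : Int) (items : List (Int × Int × Int × Int)) :
    Int × Int × List (Int × Int × Int × Int) :=
  (items.foldl pvStepB (PySem.List.pyRange 0 n, 0, 0, [])).2

-- B's path_max: dequeue BFS (fuel never exhausted on admitted inputs)
def pvBfsB (adj : List (List (Int × Int))) (target : Int) :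
    Nat → List (Int × Int × Int) → Int
  | 0, _ => -1
  | fuel+1, queue =>
    match queue with
    | [] => -1
    | (curr, par, pm) :: rest =>
      if curr = target then pm
      else pvBfsB adj target fuel
        (rest ++ ((PySem.List.pyGetD adj curr []).filter
            (fun nb => decide (nb.1 ≠ par))).map
            (fun nb => (nb.1, curr, max pm nb.2)))

def solve_small_n_alt (n : Int) (edges : List (Int × Int × Int)) : List String :=
  let order : List (Int × Int × Int × Int) :=
    PySem.List.sorted
      ((PySem.List.enumerate edges).map (fun p => (p.2.1, p.2.2.1, p.2.2.2, p.1)))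
      (fun t => t.2.2.1) false
  let base := pvKruskalB n order
  let baseW := base.1
  let tree := base.2.2
  let treeIdx := PySem.Set.ofList (tree.map (fun t => t.2.2.2))
  let adj := tree.foldl pvAdjStep ((PySem.List.pyRange 0 n).map (fun _ => []))
  let bfsFuel := n.toNat + 2 * edges.length + 5
  (PySem.List.enumerate edges).map (fun p =>
    if PySem.Set.contains treeIdx p.1 then
      let r := pvKruskalB n (order.filter (fun t => decide (t.2.2.2 ≠ p.1)))
      if r.2.1 < n - 1 ∨ r.1 > baseW then "any"
      else if p.2.2.2 = pvBfsB adj p.2.2.1 bfsFuel [(p.2.1, -1, -1)] then "at least one"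
      else "none"
    else if p.2.2.2 = pvBfsB adj p.2.2.1 bfsFuel [(p.2.1, -1, -1)] then "at least one"
    else "none")

-- ===== PRECONDITION & SPEC =====

-- Pre_ restricts vertex ids to the natural encoding 0 ≤ u,v < n.  Outside it A raises
-- IndexError (ids beyond ±n), and for negative ids Python's index wraparound makes -k an
-- alias of n-k, on which both programs can loop forever (e.g. n=3,
-- edges=[(0,1,1),(-2,2,1),(0,-1,1)]); on the negative-id inputs where A does return, the
-- aliases stay consistent and B returns the same value (see cites).
def Pre_solve_small_n (n : Int) (edges : List (Int × Int × Int)) : Prop :=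
  ∀ e ∈ edges, 0 ≤ e.1 ∧ e.1 < n ∧ 0 ≤ e.2.1 ∧ e.2.1 < n

instance (n : Int) (edges : List (Int × Int × Int)) : Decidable (Pre_solve_small_n n edges) := by
  unfold Pre_solve_small_n; infer_instance

def pvWitness_solve_small_n : Int × (List (Int × Int × Int)) :=
  (3, [(0, 1, 1), (1, 2, 2), (0, 2, 2), (0, 0, -1)])

def Spec_solve_small_n (n : Int) (edges : List (Int × Int × Int)) (out : List String) : Prop :=
  out = solve_small_n_alt n edges

instance (n : Int) (edges : List (Int × Int × Int)) (out : List String) :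
    Decidable (Spec_solve_small_n n edges out) := by unfold Spec_solve_small_n; infer_instance

-- ===== CLAIM (what is proved, stated in full; the proofs are below) =====
def Claim_equal_solve_small_n : Prop :=
  ∀ (n : Int) (edges : List (Int × Int × Int)), Dom_solve_small_n n edges →
    Pre_solve_small_n n edges → Spec_solve_small_n n edges (solve_small_n n edges)

-- ===== LEMMAS AND PROOFS =====

-- ---------- root machinery for A's DSU ----------

abbrev pvIsRoot (parent : List Int) (p : Nat) : Prop := parent.getD p 0 = (p : Int)

def pvStepP (parent : List Int) (p : Nat) : Nat := (parent.getD p 0).toNat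

def pvRootN (parent : List Int) : Nat → Nat → Nat
  | 0, p => p
  | t+1, p => if pvIsRoot parent p then p else pvRootN parent t (pvStepP parent p)

def pvWF (parent : List Int) : Prop :=
  ∀ p, p < parent.length → 0 ≤ parent.getD p 0 ∧ parent.getD p 0 < (parent.length : Int)

lemma pvRootN_succ (parent : List Int) (t p : Nat) :
    pvRootN parent (t+1) p
      = if pvIsRoot parent p then p else pvRootN parent t (pvStepP parent p) := rfl

lemma pvRootN_of_isRoot (parent : List Int) (t p) (h : pvIsRoot parent p) :
    pvRootN parent t p = p := by
  induction t with
  | zero => rfl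
  | succ t _ => rw [pvRootN_succ, if_pos h]

lemma pvRootN_stable (parent : List Int) (t s p) (h : pvIsRoot parent (pvRootN parent t p))
    (hts : t ≤ s) : pvRootN parent s p = pvRootN parent t p := by
  induction t generalizing p s with
  | zero => exact pvRootN_of_isRoot parent s p h
  | succ t ih =>
    by_cases hr : pvIsRoot parent p
    · rw [pvRootN_of_isRoot parent _ p hr, pvRootN_of_isRoot parent _ p hr]
    · obtain ⟨s', rfl⟩ : ∃ s', s = s' + 1 := ⟨s - 1, by omega⟩
      have e1 : pvRootN parent (t+1) p = pvRootN parent t (pvStepP parent p) := by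
        rw [pvRootN_succ, if_neg hr]
      have e2 : pvRootN parent (s'+1) p = pvRootN parent s' (pvStepP parent p) := by
        rw [pvRootN_succ, if_neg hr]
      rw [e1] at h
      rw [e1, e2, ih _ _ h (by omega)]

lemma pvRootN_lt (parent : List Int) (hwf : pvWF parent) (t p) (hp : p < parent.length) :
    pvRootN parent t p < parent.length := by
  induction t generalizing p with
  | zero => exact hp
  | succ t ih =>
    by_cases hr : pvIsRoot parent p
    · rw [pvRootN_of_isRoot parent _ p hr]; exact hp
    · rw [pvRootN_succ, if_neg hr]
      refine ih _ ?_
      have := hwf p hp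
      unfold pvStepP
      omega

lemma pvGetD_set_self {α : Type} (l : List α) (n : Nat) (v d : α) (h : n < l.length) :
    (l.set n v).getD n d = v := by
  simp [List.getD_eq_getElem?_getD, List.getElem?_set_self h]

lemma pvGetD_set_ne {α : Type} (l : List α) (n m : Nat) (v d : α) (h : n ≠ m) :
    (l.set n v).getD m d = l.getD m d := by
  simp [List.getD_eq_getElem?_getD, List.getElem?_set_ne h]

lemma pvSet_self (l : List Int) (n : Nat) (hn : n < l.length) :
    l.set n (l.getD n 0) = l := by
  apply List.ext_getElem?
  intro i
  rw [List.getElem?_set]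
  split
  · next h =>
    subst h
    simp [hn, List.getD_eq_getElem?_getD]
  · rfl

-- after setting parent[p0] := r where r is p0's root, every settled chain keeps its root
lemma pvRoot_set_compress (parent : List Int) (p0 r : Nat) (hp0 : p0 < parent.length)
    (hroot : pvIsRoot parent r)
    (hreach : ∃ t0, pvIsRoot parent (pvRootN parent t0 p0) ∧ pvRootN parent t0 p0 = r) :
    ∀ t j, pvIsRoot parent (pvRootN parent t j) →
      pvRootN (parent.set p0 (r : Int)) t j = pvRootN parent t j ∧
      pvIsRoot (parent.set p0 (r : Int)) (pvRootN parent t j) := by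
  obtain ⟨t0, ht0r, ht0v⟩ := hreach
  by_cases hv : parent.getD p0 0 = (r : Int)
  · have hnoop : parent.set p0 (r : Int) = parent := by rw [← hv]; exact pvSet_self _ _ hp0
    intro t j hj; rw [hnoop]; exact ⟨rfl, hj⟩
  · have hp0nr : ¬ pvIsRoot parent p0 := by
      intro hR
      rw [pvRootN_of_isRoot _ _ _ hR] at ht0v
      subst ht0v
      exact hv hroot
    have hner : p0 ≠ r := by intro h; subst h; exact hp0nr hroot
    intro t
    induction t with
    | zero =>
      intro j hj
      have hjne : p0 ≠ j := by intro h; subst h; exact hp0nr hj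
      refine ⟨rfl, ?_⟩
      show (parent.set p0 (r : Int)).getD j 0 = (j : Int)
      rw [pvGetD_set_ne _ _ _ _ _ hjne]
      exact hj
    | succ t ih =>
      intro j hj
      by_cases hjr : pvIsRoot parent j
      · rw [pvRootN_of_isRoot parent _ j hjr] at hj ⊢
        have hjne : p0 ≠ j := by intro h; subst h; exact hp0nr hjr
        have hnew : pvIsRoot (parent.set p0 (r : Int)) j := by
          show (parent.set p0 (r : Int)).getD j 0 = (j : Int)
          rw [pvGetD_set_ne _ _ _ _ _ hjne]; exact hjr
        exact ⟨pvRootN_of_isRoot _ _ _ hnew, hnew⟩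
      · by_cases hjp : j = p0
        · subst hjp
          have hold : pvRootN parent (t+1) j = r := by
            have h1 := pvRootN_stable parent (t+1) (max (t+1) t0) j hj (le_max_left _ _)
            have h2 := pvRootN_stable parent t0 (max (t+1) t0) j ht0r (le_max_right _ _)
            rw [h1] at h2
            rw [h2]; exact ht0v
          have hnewstep : (parent.set j (r : Int)).getD j 0 = (r : Int) :=
            pvGetD_set_self _ _ _ _ hp0
          have hnotroot : ¬ pvIsRoot (parent.set j (r : Int)) j := by
            show ¬ (parent.set j (r : Int)).getD j 0 = (j : Int)
            rw [hnewstep]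
            intro h
            exact hner (by exact_mod_cast h.symm)
          have hrootnew : pvIsRoot (parent.set j (r : Int)) r := by
            show (parent.set j (r : Int)).getD r 0 = (r : Int)
            rw [pvGetD_set_ne _ _ _ _ _ hner]
            exact hroot
          have hnewv : pvRootN (parent.set j (r : Int)) (t+1) j = r := by
            rw [pvRootN_succ, if_neg hnotroot]
            have hstep : pvStepP (parent.set j (r : Int)) j = r := by
              unfold pvStepP; rw [hnewstep]; exact Int.toNat_natCast r
            rw [hstep, pvRootN_of_isRoot _ _ _ hrootnew]
          rw [hold, hnewv]
          exact ⟨rfl, hrootnew⟩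
        · have hne' : p0 ≠ j := fun h => hjp h.symm
          have e : pvRootN parent (t+1) j = pvRootN parent t (pvStepP parent j) := by
            rw [pvRootN_succ, if_neg hjr]
          rw [e] at hj ⊢
          have hnr : ¬ pvIsRoot (parent.set p0 (r : Int)) j := by
            show ¬ (parent.set p0 (r : Int)).getD j 0 = (j : Int)
            rw [pvGetD_set_ne _ _ _ _ _ hne']
            exact hjr
          rw [pvRootN_succ, if_neg hnr]
          have hstep : pvStepP (parent.set p0 (r : Int)) j = pvStepP parent j := by
            unfold pvStepP; rw [pvGetD_set_ne _ _ _ _ _ hne']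
          rw [hstep]
          exact ih _ hj

-- linking root r2 under root r1 merges exactly the class of r2 into that of r1
lemma pvRoot_link (parent : List Int) (r1 r2 : Nat) (h1 : pvIsRoot parent r1)
    (h2 : pvIsRoot parent r2) (hne : r1 ≠ r2) (hr2 : r2 < parent.length) :
    ∀ t j, pvIsRoot parent (pvRootN parent t j) →
      pvRootN (parent.set r2 (r1 : Int)) (t+1) j
        = (if pvRootN parent t j = r2 then r1 else pvRootN parent t j) ∧
      pvIsRoot (parent.set r2 (r1 : Int))
        (if pvRootN parent t j = r2 then r1 else pvRootN parent t j) := by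
  have hnewr1 : pvIsRoot (parent.set r2 (r1 : Int)) r1 := by
    show (parent.set r2 (r1 : Int)).getD r1 0 = (r1 : Int)
    rw [pvGetD_set_ne _ _ _ _ _ (Ne.symm hne)]
    exact h1
  have hnewstep : (parent.set r2 (r1 : Int)).getD r2 0 = (r1 : Int) :=
    pvGetD_set_self _ _ _ _ hr2
  have hnewr2 : ¬ pvIsRoot (parent.set r2 (r1 : Int)) r2 := by
    show ¬ (parent.set r2 (r1 : Int)).getD r2 0 = (r2 : Int)
    rw [hnewstep]
    intro h
    exact hne (by exact_mod_cast h)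
  have hstepnew : pvStepP (parent.set r2 (r1 : Int)) r2 = r1 := by
    unfold pvStepP; rw [hnewstep]; exact Int.toNat_natCast r1
  have hrootcase : ∀ s j, pvIsRoot parent j →
      pvRootN (parent.set r2 (r1 : Int)) (s+1) j
        = (if j = r2 then r1 else j) ∧
      pvIsRoot (parent.set r2 (r1 : Int)) (if j = r2 then r1 else j) := by
    intro s j hj
    by_cases hjr2 : j = r2
    · subst hjr2
      rw [if_pos rfl, pvRootN_succ, if_neg hnewr2, hstepnew,
        pvRootN_of_isRoot _ _ _ hnewr1]
      exact ⟨rfl, hnewr1⟩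
    · have hnewj : pvIsRoot (parent.set r2 (r1 : Int)) j := by
        show (parent.set r2 (r1 : Int)).getD j 0 = (j : Int)
        rw [pvGetD_set_ne _ _ _ _ _ (fun h => hjr2 h.symm)]
        exact hj
      rw [if_neg hjr2, pvRootN_of_isRoot _ _ _ hnewj]
      exact ⟨rfl, hnewj⟩
  intro t
  induction t with
  | zero =>
    intro j hj
    exact hrootcase 0 j hj
  | succ t ih =>
    intro j hj
    by_cases hjroot : pvIsRoot parent j
    · rw [pvRootN_of_isRoot _ _ _ hjroot]
      exact hrootcase (t+1) j hjroot
    · have e : pvRootN parent (t+1) j = pvRootN parent t (pvStepP parent j) := by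
        rw [pvRootN_succ, if_neg hjroot]
      rw [e] at hj ⊢
      have hjner2 : r2 ≠ j := by
        intro h; subst h; exact hjroot h2
      have hnr : ¬ pvIsRoot (parent.set r2 (r1 : Int)) j := by
        show ¬ (parent.set r2 (r1 : Int)).getD j 0 = (j : Int)
        rw [pvGetD_set_ne _ _ _ _ _ hjner2]
        exact hjroot
      have hstep : pvStepP (parent.set r2 (r1 : Int)) j = pvStepP parent j := by
        unfold pvStepP; rw [pvGetD_set_ne _ _ _ _ _ hjner2]
      rw [pvRootN_succ, if_neg hnr, hstep]
      exact ih _ hj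

lemma pvWF_set (l : List Int) (hwf : pvWF l) (n v : Nat) (hv : v < l.length) :
    pvWF (l.set n (v : Int)) := by
  intro x hx
  simp only [List.length_set] at hx ⊢
  by_cases hxn : x = n
  · subst hxn
    rw [pvGetD_set_self _ _ _ _ hx]
    exact ⟨by exact_mod_cast Nat.zero_le v, by exact_mod_cast hv⟩
  · rw [pvGetD_set_ne _ _ _ _ _ (fun h => hxn h.symm)]
    exact hwf x hx

lemma pvFindA_spec (parent : List Int) (hwf : pvWF parent) :
    ∀ t fuel (p : Nat), p < parent.length → pvIsRoot parent (pvRootN parent t p) →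
      t + 1 ≤ fuel →
      (pvFindA fuel parent (p : Int)).2 = ((pvRootN parent t p : Nat) : Int) ∧
      (pvFindA fuel parent (p : Int)).1.length = parent.length ∧
      pvWF (pvFindA fuel parent (p : Int)).1 ∧
      (∀ q, q < parent.length → parent.getD q 0 = (q : Int) →
        (pvFindA fuel parent (p : Int)).1.getD q 0 = (q : Int)) ∧
      (∀ t' q, pvIsRoot parent (pvRootN parent t' q) →
        pvRootN (pvFindA fuel parent (p : Int)).1 t' q = pvRootN parent t' q ∧
        pvIsRoot (pvFindA fuel parent (p : Int)).1 (pvRootN parent t' q)) := by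
  intro t
  induction t with
  | zero =>
    intro fuel p hp hroot hfuel
    obtain ⟨f, rfl⟩ : ∃ f, fuel = f + 1 := ⟨fuel - 1, by omega⟩
    have hcond : PySem.List.pyGetD parent (p : Int) 0 = (p : Int) := by
      rw [PySem.List.pyGetD_natCast]; exact hroot
    have hred : pvFindA (f + 1) parent (p : Int) = (parent, (p : Int)) := by
      show (if PySem.List.pyGetD parent (p : Int) 0 = (p : Int) then (parent, (p : Int))
        else _) = _
      rw [if_pos hcond]
    rw [hred]
    exact ⟨rfl, rfl, hwf, fun q _ h => h, fun t' q h => ⟨rfl, h⟩⟩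
  | succ t ih =>
    intro fuel p hp hroot hfuel
    obtain ⟨f, rfl⟩ : ∃ f, fuel = f + 1 := ⟨fuel - 1, by omega⟩
    by_cases hr : pvIsRoot parent p
    · have hcond : PySem.List.pyGetD parent (p : Int) 0 = (p : Int) := by
        rw [PySem.List.pyGetD_natCast]; exact hr
      have hred : pvFindA (f + 1) parent (p : Int) = (parent, (p : Int)) := by
        show (if PySem.List.pyGetD parent (p : Int) 0 = (p : Int) then (parent, (p : Int))
          else _) = _
        rw [if_pos hcond]
      rw [pvRootN_of_isRoot _ _ _ hr, hred]
      exact ⟨rfl, rfl, hwf, fun q _ h => h, fun t' q h => ⟨rfl, h⟩⟩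
    · have hg := hwf p hp
      set gN := pvStepP parent p with hgN
      have hgcast : parent.getD p 0 = (gN : Int) := by
        rw [hgN]; unfold pvStepP; omega
      have hgNlt : gN < parent.length := by rw [hgN]; unfold pvStepP; omega
      have hrootstep : pvRootN parent (t+1) p = pvRootN parent t gN := by
        rw [pvRootN_succ, if_neg hr]
      rw [hrootstep] at hroot
      have hIH := ih f gN hgNlt hroot (by omega)
      have hexp : pvFindA (f + 1) parent (p : Int)
          = (PySem.List.pySetD (pvFindA f parent (gN : Int)).1 (p : Int)
               (pvFindA f parent (gN : Int)).2,
             (pvFindA f parent (gN : Int)).2) := by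
        have hcond : ¬ PySem.List.pyGetD parent (p : Int) 0 = (p : Int) := by
          rw [PySem.List.pyGetD_natCast]; exact hr
        show (if PySem.List.pyGetD parent (p : Int) 0 = (p : Int) then (parent, (p : Int))
          else
            (PySem.List.pySetD (pvFindA f parent (PySem.List.pyGetD parent (p : Int) 0)).1
               (p : Int) (pvFindA f parent (PySem.List.pyGetD parent (p : Int) 0)).2,
             (pvFindA f parent (PySem.List.pyGetD parent (p : Int) 0)).2)) = _
        rw [if_neg hcond, PySem.List.pyGetD_natCast, hgcast]
      obtain ⟨hv, hlen, hwf1, hfix1, hpres1⟩ := hIH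
      set q1 : List Int := (pvFindA f parent (gN : Int)).1 with hq1
      set R : Nat := pvRootN parent t gN with hR
      have hRlt : R < parent.length := pvRootN_lt parent hwf t gN hgNlt
      have hset : PySem.List.pySetD q1 (p : Int) (pvFindA f parent (gN : Int)).2
          = q1.set p (R : Int) := by
        rw [hv, PySem.List.pySetD_natCast]
      have hfst : (pvFindA (f + 1) parent (p : Int)).1 = q1.set p (R : Int) := by
        rw [hexp]; exact hset
      have hsnd : (pvFindA (f + 1) parent (p : Int)).2 = ((R : Nat) : Int) := by
        rw [hexp]; exact hv
      rw [hfst, hsnd]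
      -- compression lemma on q1
      have hRrootq1 : pvIsRoot q1 R := by
        have := hpres1 t gN hroot
        rw [← hR] at this
        exact this.2
      have hreachq1 : ∃ t0, pvIsRoot q1 (pvRootN q1 t0 p) ∧ pvRootN q1 t0 p = R := by
        refine ⟨t + 1, ?_, ?_⟩
        · have := hpres1 (t+1) p (by rw [hrootstep]; exact hroot)
          rw [this.1, hrootstep]
          have := hpres1 (t+1) p (by rw [hrootstep]; exact hroot)
          rw [hrootstep] at this
          exact this.2
        · have := hpres1 (t+1) p (by rw [hrootstep]; exact hroot)
          rw [this.1, hrootstep]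
      have hplt1 : p < q1.length := by rw [hlen]; exact hp
      have hcompress := pvRoot_set_compress q1 p R hplt1 hRrootq1 hreachq1
      refine ⟨?_, ?_, ?_, ?_, ?_⟩
      · rw [hrootstep]
      · simp [List.length_set, hlen]
      · intro x hx
        simp only [List.length_set] at hx
        by_cases hxp : x = p
        · subst hxp
          rw [pvGetD_set_self _ _ _ _ hplt1]
          constructor
          · exact_mod_cast Nat.zero_le R
          · simp only [List.length_set, hlen]
            exact_mod_cast hRlt
        · rw [pvGetD_set_ne _ _ _ _ _ (fun h => hxp h.symm)]
          simp only [List.length_set, hlen]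
          have := hwf1 x hx
          rw [hlen] at this
          exact this
      · intro q hq hfix
        have h1 := hfix1 q hq hfix
        have hqp : p ≠ q := by
          intro h; subst h; exact hr hfix
        rw [pvGetD_set_ne _ _ _ _ _ hqp]
        exact h1
      · intro t' q hgood
        have h1 := hpres1 t' q hgood
        have h2 := hcompress t' q (by rw [h1.1]; exact h1.2)
        rw [h1.1] at h2
        exact h2

lemma pvUnionA_spec (parent rank : List Int) (t fuel : Nat) (i j : Nat)
    (hwf : pvWF parent)
    (hgood : ∀ q, q < parent.length → pvIsRoot parent (pvRootN parent t q))
    (hi : i < parent.length) (hj : j < parent.length) (hfuel : t + 1 ≤ fuel) :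
    ((pvUnionA fuel parent rank (i : Int) (j : Int)).2
        = decide (pvRootN parent t i ≠ pvRootN parent t j)) ∧
    (pvUnionA fuel parent rank (i : Int) (j : Int)).1.1.length = parent.length ∧
    pvWF (pvUnionA fuel parent rank (i : Int) (j : Int)).1.1 ∧
    ((pvRootN parent t i = pvRootN parent t j →
      ∀ q, q < parent.length →
        pvRootN (pvUnionA fuel parent rank (i : Int) (j : Int)).1.1 (t+1) q
          = pvRootN parent t q ∧
        pvIsRoot (pvUnionA fuel parent rank (i : Int) (j : Int)).1.1
          (pvRootN parent t q))) ∧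
    ((pvRootN parent t i ≠ pvRootN parent t j →
      ∃ rw rl, ((rw = pvRootN parent t i ∧ rl = pvRootN parent t j) ∨
                (rw = pvRootN parent t j ∧ rl = pvRootN parent t i)) ∧ rw ≠ rl ∧
        ∀ q, q < parent.length →
          pvRootN (pvUnionA fuel parent rank (i : Int) (j : Int)).1.1 (t+1) q
            = (if pvRootN parent t q = rl then rw else pvRootN parent t q) ∧
          pvIsRoot (pvUnionA fuel parent rank (i : Int) (j : Int)).1.1
            (if pvRootN parent t q = rl then rw else pvRootN parent t q))) := by
  have hgi : pvIsRoot parent (pvRootN parent t i) := hgood i hi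
  have hgj : pvIsRoot parent (pvRootN parent t j) := hgood j hj
  obtain ⟨hv1, hlen1, hwf1, hfix1, hpres1⟩ :=
    pvFindA_spec parent hwf t fuel i hi hgi hfuel
  set p1 : List Int := (pvFindA fuel parent (i : Int)).1 with hp1def
  set ri : Nat := pvRootN parent t i with hridef
  have hp1j := hpres1 t j hgj
  obtain ⟨hv2, hlen2, hwf2, hfix2, hpres2⟩ :=
    pvFindA_spec p1 hwf1 t fuel j (by rw [hlen1]; exact hj)
      (by rw [hp1j.1]; exact hp1j.2) hfuel
  set p2 : List Int := (pvFindA fuel p1 (j : Int)).1 with hp2def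
  set rj : Nat := pvRootN parent t j with hrjdef
  have hv2' : (pvFindA fuel p1 (j : Int)).2 = ((rj : Nat) : Int) := by
    rw [hv2, hp1j.1]
  have hlen21 : p2.length = parent.length := by rw [hlen2, hlen1]
  have hpres : ∀ t' q, pvIsRoot parent (pvRootN parent t' q) →
      pvRootN p2 t' q = pvRootN parent t' q ∧ pvIsRoot p2 (pvRootN parent t' q) := by
    intro t' q hg
    have a1 := hpres1 t' q hg
    have a2 := hpres2 t' q (by rw [a1.1]; exact a1.2)
    rw [a1.1] at a2
    exact a2
  have hrilt : ri < parent.length := pvRootN_lt parent hwf t i hi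
  have hrjlt : rj < parent.length := pvRootN_lt parent hwf t j hj
  have hriroot : pvIsRoot p2 ri := by
    have := hfix2 ri (by rw [hlen1]; exact hrilt) (hfix1 ri hrilt hgi)
    exact this
  have hrjroot : pvIsRoot p2 rj := by
    exact hfix2 rj (by rw [hlen1]; exact hrjlt) (hfix1 rj hrjlt hgj)
  have hexp : pvUnionA fuel parent rank (i : Int) (j : Int)
      = (if ((ri : Nat) : Int) ≠ ((rj : Nat) : Int) then
          if PySem.List.pyGetD rank ((ri : Nat) : Int) 0
              > PySem.List.pyGetD rank ((rj : Nat) : Int) 0 then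
            ((PySem.List.pySetD p2 ((rj : Nat) : Int) ((ri : Nat) : Int), rank), true)
          else
            ((PySem.List.pySetD p2 ((ri : Nat) : Int) ((rj : Nat) : Int),
              if PySem.List.pyGetD rank ((ri : Nat) : Int) 0
                  = PySem.List.pyGetD rank ((rj : Nat) : Int) 0 then
                PySem.List.pySetD rank ((rj : Nat) : Int)
                  (PySem.List.pyGetD rank ((rj : Nat) : Int) 0 + 1)
              else rank), true)
        else ((p2, rank), false)) := by
    simp only [pvUnionA, hv1, hv2', ← hp1def, ← hp2def]
  by_cases heq : ri = rj
  · have hiffalse : ¬ (((ri : Nat) : Int) ≠ ((rj : Nat) : Int)) := by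
      simp [heq]
    rw [hexp, if_neg hiffalse]
    refine ⟨by simp [heq], hlen21, hwf2, ?_, ?_⟩
    · intro _ q hqlt
      have a := hpres t q (hgood q hqlt)
      have hst : pvRootN p2 (t+1) q = pvRootN p2 t q :=
        pvRootN_stable p2 t (t+1) q (by rw [a.1]; exact a.2) (by omega)
      rw [hst, a.1]
      exact ⟨rfl, a.2⟩
    · intro hne
      exact absurd heq (by rw [hridef, hrjdef] at hne ⊢; exact hne)
  · have hiftrue : (((ri : Nat) : Int) ≠ ((rj : Nat) : Int)) := by
      intro h; exact heq (by exact_mod_cast h)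
    rw [hexp, if_pos hiftrue]
    have hmain : ∀ (rw' rl' : Nat), rw' < parent.length →
        ((rw' = ri ∧ rl' = rj) ∨ (rw' = rj ∧ rl' = ri)) →
        pvIsRoot p2 rw' → pvIsRoot p2 rl' → rw' ≠ rl' → rl' < parent.length →
        (∀ q, q < parent.length →
          pvRootN (p2.set rl' (rw' : Int)) (t+1) q
            = (if pvRootN parent t q = rl' then rw' else pvRootN parent t q) ∧
          pvIsRoot (p2.set rl' (rw' : Int))
            (if pvRootN parent t q = rl' then rw' else pvRootN parent t q)) := by
      intro rw' rl' _ _ hrwroot hrlroot hrwrl hrllt q hqlt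
      have a := hpres t q (hgood q hqlt)
      have hlink := pvRoot_link p2 rw' rl' hrwroot hrlroot hrwrl
        (by rw [hlen21]; exact hrllt) t q (by rw [a.1]; exact a.2)
      rw [a.1] at hlink
      exact hlink
    by_cases hrank : PySem.List.pyGetD rank ((ri : Nat) : Int) 0
        > PySem.List.pyGetD rank ((rj : Nat) : Int) 0
    · rw [if_pos hrank]
      have hsetcast : PySem.List.pySetD p2 ((rj : Nat) : Int) ((ri : Nat) : Int)
          = p2.set rj (ri : Int) := PySem.List.pySetD_natCast _ _ _
      refine ⟨by simp [heq], ?_, ?_, ?_, ?_⟩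
      · simp [hsetcast, hlen21]
      · show pvWF (PySem.List.pySetD p2 ((rj : Nat) : Int) ((ri : Nat) : Int))
        rw [hsetcast]
        exact pvWF_set p2 hwf2 rj ri (by rw [hlen21]; exact hrilt)
      · intro h; exact absurd (by exact_mod_cast h : ((ri:Nat):Int) = ((rj:Nat):Int)) hiftrue
      · intro _
        refine ⟨ri, rj, Or.inl ⟨rfl, rfl⟩, heq, ?_⟩
        intro q hqlt
        show pvRootN (PySem.List.pySetD p2 ((rj : Nat) : Int) ((ri : Nat) : Int)) (t+1) q
            = _ ∧ _
        rw [hsetcast]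
        exact hmain ri rj hrilt (Or.inl ⟨rfl, rfl⟩) hriroot hrjroot heq hrjlt q hqlt
    · rw [if_neg hrank]
      have hsetcast : PySem.List.pySetD p2 ((ri : Nat) : Int) ((rj : Nat) : Int)
          = p2.set ri (rj : Int) := PySem.List.pySetD_natCast _ _ _
      have hne' : rj ≠ ri := fun h => heq h.symm
      refine ⟨by simp [heq], ?_, ?_, ?_, ?_⟩
      · simp [hsetcast, hlen21]
      · show pvWF (PySem.List.pySetD p2 ((ri : Nat) : Int) ((rj : Nat) : Int))
        rw [hsetcast]
        exact pvWF_set p2 hwf2 ri rj (by rw [hlen21]; exact hrjlt)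
      · intro h; exact absurd (by exact_mod_cast h : ((ri:Nat):Int) = ((rj:Nat):Int)) hiftrue
      · intro _
        refine ⟨rj, ri, Or.inr ⟨rfl, rfl⟩, hne', ?_⟩
        intro q hqlt
        show pvRootN (PySem.List.pySetD p2 ((ri : Nat) : Int) ((rj : Nat) : Int)) (t+1) q
            = _ ∧ _
        rw [hsetcast]
        exact hmain rj ri hrjlt (Or.inr ⟨rfl, rfl⟩) hrjroot hriroot hne' hrilt q hqlt

-- ---------- merged-partition characterisation ----------

lemma pvMerged_eq_iff {α : Type} [DecidableEq α] (rw rl a b : α) :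
    ((if a = rl then rw else a) = (if b = rl then rw else b))
      ↔ (a = b ∨ ((a = rl ∨ a = rw) ∧ (b = rl ∨ b = rw))) := by
  split_ifs with h1 h2 h2 <;> simp_all
  tauto

-- ---------- the two Kruskal bisimulations ----------

def pvLInv (parent comp : List Int) (t : Nat) : Prop :=
  ∀ p q, p < parent.length → q < parent.length →
    (pvRootN parent t p = pvRootN parent t q ↔ comp.getD p 0 = comp.getD q 0)

lemma pvGetD_map_ite (comp : List Int) (cv cu : Int) (p : Nat) (hp : p < comp.length) :
    (comp.map (fun c => if c = cv then cu else c)).getD p 0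
      = (if comp.getD p 0 = cv then cu else comp.getD p 0) := by
  rw [List.getD_eq_getElem?_getD, List.getD_eq_getElem?_getD, List.getElem?_map,
    List.getElem?_eq_getElem hp]
  rfl

set_option maxHeartbeats 1000000 in
lemma pvKruskalStep (fuel t : Nat) (parent rank comp : List Int) (u v : Int)
    (hcomp : comp.length = parent.length) (hwf : pvWF parent)
    (hgood : ∀ q, q < parent.length → pvIsRoot parent (pvRootN parent t q))
    (hL : pvLInv parent comp t)
    (hu0 : 0 ≤ u) (hult : u < (parent.length : Int))
    (hv0 : 0 ≤ v) (hvlt : v < (parent.length : Int))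
    (hfuel : t + 1 ≤ fuel) :
    ((pvUnionA fuel parent rank u v).2 = true
        ↔ ¬ PySem.List.pyGetD comp u 0 = PySem.List.pyGetD comp v 0) ∧
    (pvUnionA fuel parent rank u v).1.1.length = parent.length ∧
    pvWF (pvUnionA fuel parent rank u v).1.1 ∧
    (∀ q, q < parent.length →
      pvIsRoot (pvUnionA fuel parent rank u v).1.1
        (pvRootN (pvUnionA fuel parent rank u v).1.1 (t+1) q)) ∧
    ((pvUnionA fuel parent rank u v).2 = true →
      pvLInv (pvUnionA fuel parent rank u v).1.1
        (comp.map (fun c => if c = PySem.List.pyGetD comp v 0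
            then PySem.List.pyGetD comp u 0 else c)) (t+1)) ∧
    ((pvUnionA fuel parent rank u v).2 = false →
      pvLInv (pvUnionA fuel parent rank u v).1.1 comp (t+1)) := by
  obtain ⟨uN, rfl⟩ : ∃ uN : Nat, u = (uN : Int) :=
    ⟨u.toNat, (Int.toNat_of_nonneg hu0).symm⟩
  obtain ⟨vN, rfl⟩ : ∃ vN : Nat, v = (vN : Int) :=
    ⟨v.toNat, (Int.toNat_of_nonneg hv0).symm⟩
  have hult' : uN < parent.length := by omega
  have hvlt' : vN < parent.length := by omega
  obtain ⟨hdec, hlen, hwfn, heqcase, hnecase⟩ :=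
    pvUnionA_spec parent rank t fuel uN vN hwf hgood hult' hvlt' hfuel
  have hcu : PySem.List.pyGetD comp ((uN : Nat) : Int) 0 = comp.getD uN 0 :=
    PySem.List.pyGetD_natCast comp uN 0
  have hcv : PySem.List.pyGetD comp ((vN : Nat) : Int) 0 = comp.getD vN 0 :=
    PySem.List.pyGetD_natCast comp vN 0
  have hLuv : pvRootN parent t uN = pvRootN parent t vN
      ↔ comp.getD uN 0 = comp.getD vN 0 := hL uN vN hult' hvlt'
  have hdec' : (pvUnionA fuel parent rank (uN : Int) (vN : Int)).2 = true
      ↔ ¬ comp.getD uN 0 = comp.getD vN 0 := by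
    rw [hdec]
    simp only [decide_eq_true_eq]
    exact not_congr hLuv
  refine ⟨by rw [hdec', hcu, hcv], hlen, hwfn, ?_, ?_, ?_⟩
  · intro q hq
    by_cases hcase : pvRootN parent t uN = pvRootN parent t vN
    · have := heqcase hcase q hq
      rw [this.1]
      exact this.2
    · obtain ⟨rw', rl', _, _, hall⟩ := hnecase hcase
      have := hall q hq
      rw [this.1]
      exact this.2
  · intro htrue
    have hcase : pvRootN parent t uN ≠ pvRootN parent t vN := by
      rw [hdec', ← hLuv] at htrue
      exact htrue
    obtain ⟨rw', rl', horient, hrwrl, hall⟩ := hnecase hcase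
    intro p q hp hq
    rw [hlen] at hp hq
    have hp' : p < comp.length := by omega
    have hq' : q < comp.length := by omega
    have e1p := hL p uN hp hult'
    have e2p := hL p vN hp hvlt'
    have e1q := hL q uN hq hult'
    have e2q := hL q vN hq hvlt'
    have hpq := hL p q hp hq
    rw [(hall p hp).1, (hall q hq).1, hcu, hcv,
      pvGetD_map_ite comp _ _ p hp', pvGetD_map_ite comp _ _ q hq',
      pvMerged_eq_iff, pvMerged_eq_iff]
    rcases horient with ⟨rfl, rfl⟩ | ⟨rfl, rfl⟩
    · rw [hpq, e1p, e2p, e1q, e2q]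
    · rw [hpq, e1p, e2p, e1q, e2q]
      exact or_congr Iff.rfl (and_congr or_comm or_comm)
  · intro hfalse
    have hcase : pvRootN parent t uN = pvRootN parent t vN := by
      by_contra hcon
      rw [hdec] at hfalse
      simp only [decide_eq_false_iff_not, not_not] at hfalse
      exact hcon hfalse
    intro p q hp hq
    rw [hlen] at hp hq
    rw [(heqcase hcase p hp).1, (heqcase hcase q hq).1]
    exact hL p q hp hq

lemma pvPhase1_bisim (fuel : Nat) :
    ∀ (es : List (Int × Int × Int × Int)) (t : Nat) (parent rank comp : List Int)
      (chosen : List (Int × Int × Int × Int)) (w cnt : Int)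
      (adj0 adjA : List (List (Int × Int))),
      (∀ e ∈ es, 0 ≤ e.1 ∧ e.1 < (parent.length : Int) ∧
                 0 ≤ e.2.1 ∧ e.2.1 < (parent.length : Int)) →
      comp.length = parent.length → pvWF parent →
      (∀ q, q < parent.length → pvIsRoot parent (pvRootN parent t q)) →
      pvLInv parent comp t →
      t + es.length + 1 ≤ fuel →
      adjA = chosen.foldl pvAdjStep adj0 →
      (es.foldl (pvStepA fuel) (parent, rank, chosen, w, adjA)).2.2.1
          = (es.foldl pvStepB (comp, w, cnt, chosen)).2.2.2 ∧
      (es.foldl (pvStepA fuel) (parent, rank, chosen, w, adjA)).2.2.2.1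
          = (es.foldl pvStepB (comp, w, cnt, chosen)).2.1 ∧
      (es.foldl (pvStepA fuel) (parent, rank, chosen, w, adjA)).2.2.2.2
          = ((es.foldl pvStepB (comp, w, cnt, chosen)).2.2.2).foldl pvAdjStep adj0 ∧
      (∀ x ∈ (es.foldl pvStepB (comp, w, cnt, chosen)).2.2.2, x ∈ chosen ∨ x ∈ es) := by
  intro es
  induction es with
  | nil =>
    intro t parent rank comp chosen w cnt adj0 adjA hids hcomp hwf hgood hL hfuel hadj
    exact ⟨rfl, rfl, hadj, fun x hx => Or.inl hx⟩
  | cons e es ih =>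
    intro t parent rank comp chosen w cnt adj0 adjA hids hcomp hwf hgood hL hfuel hadj
    have he := hids e List.mem_cons_self
    obtain ⟨hdec, hlen, hwfn, hgoodn, hLtrue, hLfalse⟩ :=
      pvKruskalStep fuel t parent rank comp e.1 e.2.1 hcomp hwf hgood hL
        he.1 he.2.1 he.2.2.1 he.2.2.2 (by omega)
    have hids' : ∀ x ∈ es, 0 ≤ x.1 ∧
        x.1 < ((pvUnionA fuel parent rank e.1 e.2.1).1.1.length : Int) ∧
        0 ≤ x.2.1 ∧ x.2.1 < ((pvUnionA fuel parent rank e.1 e.2.1).1.1.length : Int) := by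
      intro x hx
      have := hids x (List.mem_cons_of_mem e hx)
      rw [hlen]
      exact this
    have hgoodn' : ∀ q, q < (pvUnionA fuel parent rank e.1 e.2.1).1.1.length →
        pvIsRoot (pvUnionA fuel parent rank e.1 e.2.1).1.1
          (pvRootN (pvUnionA fuel parent rank e.1 e.2.1).1.1 (t+1) q) := by
      intro q hq
      exact hgoodn q (by omega)
    simp only [List.foldl_cons]
    by_cases hd : (pvUnionA fuel parent rank e.1 e.2.1).2 = true
    · have hBdec : ¬ PySem.List.pyGetD comp e.1 0 = PySem.List.pyGetD comp e.2.1 0 :=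
        hdec.mp hd
      have hA : pvStepA fuel (parent, rank, chosen, w, adjA) e
          = ((pvUnionA fuel parent rank e.1 e.2.1).1.1,
             (pvUnionA fuel parent rank e.1 e.2.1).1.2,
             chosen ++ [e], w + e.2.2.1, pvAdjStep adjA e) := by
        simp only [pvStepA, hd, if_true]
      have hB : pvStepB (comp, w, cnt, chosen) e
          = (comp.map (fun c => if c = PySem.List.pyGetD comp e.2.1 0
                then PySem.List.pyGetD comp e.1 0 else c),
             w + e.2.2.1, cnt + 1, chosen ++ [e]) := by
        simp only [pvStepB]
        rw [if_pos hBdec]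
      rw [hA, hB]
      have hres := ih (t+1) (pvUnionA fuel parent rank e.1 e.2.1).1.1
        (pvUnionA fuel parent rank e.1 e.2.1).1.2
        (comp.map (fun c => if c = PySem.List.pyGetD comp e.2.1 0
            then PySem.List.pyGetD comp e.1 0 else c))
        (chosen ++ [e]) (w + e.2.2.1) (cnt + 1) adj0 (pvAdjStep adjA e)
        hids' (by rw [List.length_map, hcomp, hlen]) hwfn hgoodn'
        (hLtrue hd) (by simp only [List.length_cons] at hfuel; omega)
        (by rw [List.foldl_append, List.foldl_cons, List.foldl_nil, hadj])
      refine ⟨hres.1, hres.2.1, hres.2.2.1, ?_⟩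
      intro x hx
      rcases hres.2.2.2 x hx with h | h
      · rcases List.mem_append.mp h with h' | h'
        · exact Or.inl h'
        · exact Or.inr (List.mem_cons.mpr (Or.inl (List.mem_singleton.mp h')))
      · exact Or.inr (List.mem_cons_of_mem e h)
    · have hd' : (pvUnionA fuel parent rank e.1 e.2.1).2 = false :=
        Bool.not_eq_true _ ▸ eq_false_of_ne_true hd
      have hBdec : PySem.List.pyGetD comp e.1 0 = PySem.List.pyGetD comp e.2.1 0 := by
        by_contra hcon
        exact hd (hdec.mpr hcon)
      have hA : pvStepA fuel (parent, rank, chosen, w, adjA) e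
          = ((pvUnionA fuel parent rank e.1 e.2.1).1.1,
             (pvUnionA fuel parent rank e.1 e.2.1).1.2,
             chosen, w, adjA) := by
        simp only [pvStepA, hd']
        rfl
      have hB : pvStepB (comp, w, cnt, chosen) e = (comp, w, cnt, chosen) := by
        simp only [pvStepB]
        rw [if_neg (by simpa using hBdec)]
      rw [hA, hB]
      have hres := ih (t+1) (pvUnionA fuel parent rank e.1 e.2.1).1.1
        (pvUnionA fuel parent rank e.1 e.2.1).1.2 comp chosen w cnt adj0 adjA
        hids' (by rw [hcomp, hlen]) hwfn hgoodn'
        (hLfalse hd') (by simp only [List.length_cons] at hfuel; omega) hadj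
      refine ⟨hres.1, hres.2.1, hres.2.2.1, ?_⟩
      intro x hx
      rcases hres.2.2.2 x hx with h | h
      · exact Or.inl h
      · exact Or.inr (List.mem_cons_of_mem e h)

lemma pvPhase3_bisim (fuel : Nat) :
    ∀ (es : List (Int × Int × Int × Int)) (t : Nat) (parent rank comp : List Int)
      (chosen : List (Int × Int × Int × Int)) (w cnt : Int),
      (∀ e ∈ es, 0 ≤ e.1 ∧ e.1 < (parent.length : Int) ∧
                 0 ≤ e.2.1 ∧ e.2.1 < (parent.length : Int)) →
      comp.length = parent.length → pvWF parent →
      (∀ q, q < parent.length → pvIsRoot parent (pvRootN parent t q)) →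
      pvLInv parent comp t →
      t + es.length + 1 ≤ fuel →
      (es.foldl (pvStepA3Body fuel) ((parent, rank), w, cnt)).2.1
          = (es.foldl pvStepB (comp, w, cnt, chosen)).2.1 ∧
      (es.foldl (pvStepA3Body fuel) ((parent, rank), w, cnt)).2.2
          = (es.foldl pvStepB (comp, w, cnt, chosen)).2.2.1 := by
  intro es
  induction es with
  | nil =>
    intro t parent rank comp chosen w cnt hids hcomp hwf hgood hL hfuel
    exact ⟨rfl, rfl⟩
  | cons e es ih =>
    intro t parent rank comp chosen w cnt hids hcomp hwf hgood hL hfuel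
    have he := hids e List.mem_cons_self
    obtain ⟨hdec, hlen, hwfn, hgoodn, hLtrue, hLfalse⟩ :=
      pvKruskalStep fuel t parent rank comp e.1 e.2.1 hcomp hwf hgood hL
        he.1 he.2.1 he.2.2.1 he.2.2.2 (by omega)
    have hids' : ∀ x ∈ es, 0 ≤ x.1 ∧
        x.1 < ((pvUnionA fuel parent rank e.1 e.2.1).1.1.length : Int) ∧
        0 ≤ x.2.1 ∧ x.2.1 < ((pvUnionA fuel parent rank e.1 e.2.1).1.1.length : Int) := by
      intro x hx
      have := hids x (List.mem_cons_of_mem e hx)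
      rw [hlen]
      exact this
    have hgoodn' : ∀ q, q < (pvUnionA fuel parent rank e.1 e.2.1).1.1.length →
        pvIsRoot (pvUnionA fuel parent rank e.1 e.2.1).1.1
          (pvRootN (pvUnionA fuel parent rank e.1 e.2.1).1.1 (t+1) q) := by
      intro q hq
      exact hgoodn q (by omega)
    simp only [List.foldl_cons]
    by_cases hd : (pvUnionA fuel parent rank e.1 e.2.1).2 = true
    · have hBdec : ¬ PySem.List.pyGetD comp e.1 0 = PySem.List.pyGetD comp e.2.1 0 :=
        hdec.mp hd
      have hA : pvStepA3Body fuel ((parent, rank), w, cnt) e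
          = (((pvUnionA fuel parent rank e.1 e.2.1).1.1,
              (pvUnionA fuel parent rank e.1 e.2.1).1.2), w + e.2.2.1, cnt + 1) := by
        simp only [pvStepA3Body, hd, if_true]
      have hB : pvStepB (comp, w, cnt, chosen) e
          = (comp.map (fun c => if c = PySem.List.pyGetD comp e.2.1 0
                then PySem.List.pyGetD comp e.1 0 else c),
             w + e.2.2.1, cnt + 1, chosen ++ [e]) := by
        simp only [pvStepB]
        rw [if_pos hBdec]
      rw [hA, hB]
      exact ih (t+1) (pvUnionA fuel parent rank e.1 e.2.1).1.1
        (pvUnionA fuel parent rank e.1 e.2.1).1.2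
        (comp.map (fun c => if c = PySem.List.pyGetD comp e.2.1 0
            then PySem.List.pyGetD comp e.1 0 else c))
        (chosen ++ [e]) (w + e.2.2.1) (cnt + 1)
        hids' (by rw [List.length_map, hcomp, hlen]) hwfn hgoodn'
        (hLtrue hd) (by simp only [List.length_cons] at hfuel; omega)
    · have hd' : (pvUnionA fuel parent rank e.1 e.2.1).2 = false :=
        Bool.not_eq_true _ ▸ eq_false_of_ne_true hd
      have hBdec : PySem.List.pyGetD comp e.1 0 = PySem.List.pyGetD comp e.2.1 0 := by
        by_contra hcon
        exact hd (hdec.mpr hcon)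
      have hA : pvStepA3Body fuel ((parent, rank), w, cnt) e
          = (((pvUnionA fuel parent rank e.1 e.2.1).1.1,
              (pvUnionA fuel parent rank e.1 e.2.1).1.2), w, cnt) := by
        simp only [pvStepA3Body, hd']
        rfl
      have hB : pvStepB (comp, w, cnt, chosen) e = (comp, w, cnt, chosen) := by
        simp only [pvStepB]
        rw [if_neg (by simpa using hBdec)]
      rw [hA, hB]
      exact ih (t+1) (pvUnionA fuel parent rank e.1 e.2.1).1.1
        (pvUnionA fuel parent rank e.1 e.2.1).1.2 comp chosen w cnt
        hids' (by rw [hcomp, hlen]) hwfn hgoodn'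
        (hLfalse hd') (by simp only [List.length_cons] at hfuel; omega)

-- ---------- BFS bisimulation ----------

lemma pvBfsA_succ (adj : List (List (Int × Int))) (target : Int) (fuel : Nat)
    (q : List (Int × Int × Int)) (head : Int) (visited : PySem.Set Int) :
    pvBfsA adj target (fuel+1) q head visited =
      (if head < (q.length : Int) then
        let e := PySem.List.pyGetD q head (0, 0, 0)
        if e.1 = target then e.2.2
        else
          let st := (PySem.List.pyGetD adj e.1 []).foldl
            (fun (s : PySem.Set Int × List (Int × Int × Int)) nb =>
              if nb.1 ≠ e.2.1 then
                (PySem.Set.add s.1 nb.1, s.2 ++ [(nb.1, e.1, max e.2.2 nb.2)])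
              else s)
            (visited, q)
          pvBfsA adj target fuel st.2 (head + 1) st.1
      else -1) := rfl

lemma pvBfsB_cons (adj : List (List (Int × Int))) (target : Int) (fuel : Nat)
    (e : Int × Int × Int) (rest : List (Int × Int × Int)) :
    pvBfsB adj target (fuel+1) (e :: rest) =
      (if e.1 = target then e.2.2
       else pvBfsB adj target fuel
        (rest ++ ((PySem.List.pyGetD adj e.1 []).filter
            (fun nb => decide (nb.1 ≠ e.2.1))).map
            (fun nb => (nb.1, e.1, max e.2.2 nb.2)))) := by
  obtain ⟨c, p, m⟩ := e
  rfl

lemma pvBfs_bisim (adj : List (List (Int × Int))) (target : Int) :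
    ∀ fuel (q : List (Int × Int × Int)) (head : Int) visited,
      0 ≤ head → head.toNat ≤ q.length →
      pvBfsA adj target fuel q head visited = pvBfsB adj target fuel (q.drop head.toNat) := by
  intro fuel
  induction fuel with
  | zero =>
    intro q head visited h0 hle
    rfl
  | succ fuel ih =>
    intro q head visited h0 hle
    by_cases hlt : head.toNat < q.length
    · have hcond : head < (q.length : Int) := by omega
      have hdrop : q.drop head.toNat = q[head.toNat] :: q.drop (head.toNat + 1) :=
        List.drop_eq_getElem_cons hlt
      have hget : PySem.List.pyGetD q head (0, 0, 0) = q[head.toNat] := by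
        rw [PySem.List.pyGetD_of_nonneg _ _ h0, List.getD_eq_getElem?_getD,
          List.getElem?_eq_getElem hlt]
        rfl
      rw [pvBfsA_succ, if_pos hcond]
      simp only [hget, hdrop, pvBfsB_cons]
      by_cases ht : (q[head.toNat]).1 = target
      · rw [if_pos ht, if_pos ht]
      · rw [if_neg ht, if_neg ht]
        have hcongr : (PySem.List.pyGetD adj (q[head.toNat]).1 []).foldl
            (fun (s : PySem.Set Int × List (Int × Int × Int)) nb =>
              if nb.1 ≠ (q[head.toNat]).2.1 then
                (PySem.Set.add s.1 nb.1,
                 s.2 ++ [(nb.1, (q[head.toNat]).1, max (q[head.toNat]).2.2 nb.2)])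
              else s)
            (visited, q)
            = (PySem.List.pyGetD adj (q[head.toNat]).1 []).foldl
            (fun (s : PySem.Set Int × List (Int × Int × Int)) nb =>
              ((if nb.1 ≠ (q[head.toNat]).2.1 then PySem.Set.add s.1 nb.1 else s.1),
               (if nb.1 ≠ (q[head.toNat]).2.1 then
                  s.2 ++ [(nb.1, (q[head.toNat]).1, max (q[head.toNat]).2.2 nb.2)]
                else s.2)))
            (visited, q) := by
          apply PySem.List.foldl_congr_mem
          intro acc x _
          by_cases hP : x.1 ≠ (q[head.toNat]).2.1
          · rw [if_pos hP, if_pos hP, if_pos hP]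
          · rw [if_neg hP, if_neg hP, if_neg hP]
        rw [hcongr, PySem.List.foldl_prod_mk
          (f := fun (s : PySem.Set Int) (nb : Int × Int) =>
            if nb.1 ≠ (q[head.toNat]).2.1 then PySem.Set.add s nb.1 else s)
          (g := fun (s : List (Int × Int × Int)) (nb : Int × Int) =>
            if nb.1 ≠ (q[head.toNat]).2.1 then
              s ++ [(nb.1, (q[head.toNat]).1, max (q[head.toNat]).2.2 nb.2)]
            else s)]
        rw [PySem.List.foldl_append_ite
          (p := fun (nb : Int × Int) => nb.1 ≠ (q[head.toNat]).2.1)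
          (f := fun (nb : Int × Int) =>
            ((nb.1 : Int), (q[head.toNat]).1, max (q[head.toNat]).2.2 nb.2))]
        have hrec := ih (q ++ ((PySem.List.pyGetD adj (q[head.toNat]).1 []).filter
              (fun nb => decide (nb.1 ≠ (q[head.toNat]).2.1))).map
              (fun nb => ((nb.1 : Int), (q[head.toNat]).1, max (q[head.toNat]).2.2 nb.2)))
          (head + 1) ((PySem.List.pyGetD adj (q[head.toNat]).1 []).foldl
            (fun (s : PySem.Set Int) (nb : Int × Int) =>
              if nb.1 ≠ (q[head.toNat]).2.1 then PySem.Set.add s nb.1 else s) visited)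
          (by omega) (by simp [List.length_append]; omega)
        have htn : (head + 1).toNat = head.toNat + 1 := by omega
        rw [htn] at hrec
        rw [hrec, List.drop_append_of_le_length (by omega)]
    · have hcond : ¬ head < (q.length : Int) := by omega
      rw [pvBfsA_succ, if_neg hcond, List.drop_of_length_le (by omega)]
      rfl

-- ---------- answers-array characterisation ----------

lemma pvFoldSet_length {E : Type} (es : List E) (P : E → Prop) [DecidablePred P]
    (idx : E → Int) (v : String) (init : List String) :
    (es.foldl (fun a e => if P e then PySem.List.pySetD a (idx e) v else a) init).length
      = init.length := by
  induction es generalizing init with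
  | nil => rfl
  | cons e es ih =>
    rw [List.foldl_cons]
    by_cases hP : P e
    · rw [if_pos hP, ih, PySem.List.length_pySetD]
    · rw [if_neg hP, ih]

lemma pvFoldSet_getElem? {E : Type} (es : List E) (P : E → Prop) [DecidablePred P]
    (idx : E → Int) (v : String) (init : List String) (k : Nat)
    (hidx : ∀ e ∈ es, 0 ≤ idx e) (hk : k < init.length) :
    (es.foldl (fun a e => if P e then PySem.List.pySetD a (idx e) v else a) init)[k]?
      = if es.any (fun e => decide (P e) && (idx e == (k : Int))) then some v
        else init[k]? := by
  induction es generalizing init with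
  | nil => simp
  | cons e es ih =>
    have hnon := hidx e List.mem_cons_self
    have hidx' : ∀ x ∈ es, 0 ≤ idx x := fun x hx => hidx x (List.mem_cons_of_mem _ hx)
    rw [List.foldl_cons, List.any_cons]
    by_cases hP : P e
    · rw [if_pos hP, PySem.List.pySetD_of_nonneg _ _ hnon,
        ih (init.set (idx e).toNat v) hidx' (by rw [List.length_set]; exact hk)]
      by_cases hrest : es.any (fun e => decide (P e) && (idx e == (k : Int))) = true
      · rw [if_pos hrest, if_pos (by rw [hrest]; simp)]
      · rw [if_neg hrest]
        have hrest' : (es.any fun e => decide (P e) && (idx e == (k : Int))) = false :=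
          eq_false_of_ne_true hrest
        rw [hrest']
        by_cases hek : idx e = (k : Int)
        · have htN : (idx e).toNat = k := by omega
          rw [htN, List.getElem?_set_self hk]
          rw [if_pos (by simp [hP, hek])]
        · have htN : (idx e).toNat ≠ k := by omega
          rw [List.getElem?_set_ne htN]
          rw [if_neg (by simp [hek])]
    · rw [if_neg hP, ih init hidx' hk]
      have : decide (P e) = false := by simp [hP]
      rw [this]
      simp

lemma pvEnumAny {T : Type} (xs : List T) (k : Nat) (hk : k < xs.length)
    (f : Int × T → Bool) :
    (PySem.List.enumerate xs).any (fun p => f p && (p.1 == (k : Int)))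
      = f ((k : Int), xs[k]) := by
  cases hfb : f ((k : Int), xs[k]) with
  | true =>
    apply List.any_eq_true.mpr
    refine ⟨((k : Int), xs[k]), ?_, by simp [hfb]⟩
    apply (PySem.List.mem_enumerate_iff xs 0 _).mpr
    exact ⟨k, hk, by simp⟩
  | false =>
    apply List.any_eq_false.mpr
    intro p hp
    obtain ⟨j, hj, rfl⟩ := (PySem.List.mem_enumerate_iff xs 0 p).mp hp
    simp only [zero_add, Bool.and_eq_true, beq_iff_eq, Int.natCast_inj, not_and]
    intro hfj hjk
    have hjk' : j = k := by exact_mod_cast hjk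
    subst hjk'
    rw [hfj] at hfb
    exact absurd hfb (by simp)

lemma pvAnyAndConst {E : Type} (l : List E) (g : E → Bool) (b : Bool) (P : E → Bool)
    (h : ∀ e ∈ l, g e = true → P e = b) :
    l.any (fun e => P e && g e) = (b && l.any g) := by
  induction l with
  | nil => simp
  | cons e l ih =>
    have ih' := ih (fun x hx => h x (List.mem_cons_of_mem _ hx))
    rw [List.any_cons, List.any_cons, ih']
    cases hge : g e with
    | true =>
      rw [h e List.mem_cons_self hge]
      cases b <;> simp
    | false =>
      cases b <;> simp

-- ===== VERDICT (by name: the statement is the Claim_ definition above) =====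
theorem solve_small_n_spec : Claim_equal_solve_small_n := by
  intro n edges _ hpre
  unfold Spec_solve_small_n
  set es : List (Int × Int × Int × Int) :=
    PySem.List.sorted ((PySem.List.enumerate edges).map
      (fun p => (p.2.1, p.2.2.1, p.2.2.2, p.1))) (fun e => e.2.2.1) false with hes
  set fuel : Nat := n.toNat + edges.length + 1 with hfueldef
  set bfsFuel : Nat := n.toNat + 2 * edges.length + 5 with hbfsdef
  set parent0 : List Int := PySem.List.pyRange 0 n with hparent0
  set rank0 : List Int := PySem.List.pyRepeat [(0 : Int)] n with hrank0
  set adj0 : List (List (Int × Int)) := (PySem.List.pyRange 0 n).map (fun _ => [])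
    with hadj0
  set st := es.foldl (pvStepA fuel) (parent0, rank0, [], 0, adj0) with hst
  set resB := es.foldl pvStepB (parent0, (0 : Int), (0 : Int),
    ([] : List (Int × Int × Int × Int))) with hresB
  have hAexp : solve_small_n n edges =
      st.2.2.1.foldl (fun ans e =>
        if (es.foldl (pvStepA3 fuel e.2.2.2) ((parent0, rank0), 0, 0)).2.2 < n - 1
            ∨ (es.foldl (pvStepA3 fuel e.2.2.2) ((parent0, rank0), 0, 0)).2.1 > st.2.2.2.1
        then PySem.List.pySetD ans e.2.2.2 "any" else ans)
        (es.foldl (fun ans e =>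
          if e.2.2.1 = pvBfsA st.2.2.2.2 e.2.1 bfsFuel [(e.1, -1, -1)] 0
              (PySem.Set.ofList [e.1])
          then PySem.List.pySetD ans e.2.2.2 "at least one" else ans)
          (PySem.List.pyRepeat ["none"] (edges.length : Int))) := rfl
  have hBexp : solve_small_n_alt n edges =
      (PySem.List.enumerate edges).map (fun p =>
        if PySem.Set.contains (PySem.Set.ofList (resB.2.2.2.map (fun t => t.2.2.2))) p.1
        then
          if ((es.filter (fun t => decide (t.2.2.2 ≠ p.1))).foldl pvStepB
                (parent0, 0, 0, [])).2.2.1 < n - 1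
              ∨ ((es.filter (fun t => decide (t.2.2.2 ≠ p.1))).foldl pvStepB
                (parent0, 0, 0, [])).2.1 > resB.2.1 then "any"
          else if p.2.2.2 = pvBfsB (resB.2.2.2.foldl pvAdjStep adj0) p.2.2.1 bfsFuel
              [(p.2.1, -1, -1)] then "at least one"
          else "none"
        else if p.2.2.2 = pvBfsB (resB.2.2.2.foldl pvAdjStep adj0) p.2.2.1 bfsFuel
            [(p.2.1, -1, -1)] then "at least one"
        else "none") := rfl
  rw [hAexp, hBexp]
  have hlen_es : es.length = edges.length := by
    rw [hes, (PySem.List.sorted_perm _ _ _).length_eq, List.length_map,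
      PySem.List.length_enumerate]
  have hmemE : ∀ e ∈ es, ∃ (k : Nat) (_ : k < edges.length),
      e = (edges[k].1, edges[k].2.1, edges[k].2.2, (k : Int)) := by
    intro e he
    have hmm := (PySem.List.sorted_perm _ _ _).mem_iff.mp (hes ▸ he)
    obtain ⟨p, hp, rfl⟩ := List.mem_map.mp hmm
    obtain ⟨k, hk, rfl⟩ := (PySem.List.mem_enumerate_iff _ _ _).mp hp
    exact ⟨k, hk, by simp⟩
  have hlen0 : parent0.length = n.toNat := by
    rw [hparent0, PySem.List.length_pyRange_one]
    norm_num
  have hget0 : ∀ p : Nat, p < parent0.length → parent0.getD p 0 = (p : Int) := by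
    intro p hp
    rw [hparent0] at hp ⊢
    rw [List.getD_eq_getElem?_getD, List.getElem?_eq_getElem hp,
      PySem.List.getElem_pyRange_one 0 n p hp]
    simp
  have hwf0 : pvWF parent0 := by
    intro p hp
    rw [hget0 p hp]
    exact ⟨Int.natCast_nonneg p, by exact_mod_cast hp⟩
  have hgood0 : ∀ q, q < parent0.length → pvIsRoot parent0 (pvRootN parent0 0 q) := by
    intro q hq
    exact hget0 q hq
  have hL0 : pvLInv parent0 parent0 0 := by
    intro p q hp hq
    show ((p : Nat) = q) ↔ _
    rw [hget0 p hp, hget0 q hq]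
    exact ⟨fun h => by exact_mod_cast h, fun h => by exact_mod_cast h⟩
  have hids : ∀ e ∈ es, 0 ≤ e.1 ∧ e.1 < (parent0.length : Int) ∧
      0 ≤ e.2.1 ∧ e.2.1 < (parent0.length : Int) := by
    intro e he
    obtain ⟨k, hk, rfl⟩ := hmemE e he
    have hedge := hpre edges[k] (List.getElem_mem hk)
    rw [hlen0]
    dsimp only
    refine ⟨hedge.1, by omega, hedge.2.2.1, by omega⟩
  have hidxpos : ∀ e ∈ es, 0 ≤ e.2.2.2 := by
    intro e he
    obtain ⟨k, hk, rfl⟩ := hmemE e he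
    exact Int.natCast_nonneg k
  have hfuel1 : 0 + es.length + 1 ≤ fuel := by
    rw [hlen_es, hfueldef]
    omega
  obtain ⟨hmst, hw, hadjeq, hsub⟩ := pvPhase1_bisim fuel es 0 parent0 rank0 parent0
    [] 0 0 adj0 adj0 hids rfl hwf0 hgood0 hL0 hfuel1 rfl
  have htreemem : ∀ x ∈ resB.2.2.2, x ∈ es := by
    intro x hx
    rcases hsub x hx with h | h
    · exact absurd h (List.not_mem_nil)
    · exact h
  have hreruns : ∀ i : Int,
      (es.foldl (pvStepA3 fuel i) ((parent0, rank0), 0, 0)).2.1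
        = ((es.filter (fun t => decide (t.2.2.2 ≠ i))).foldl pvStepB
            (parent0, 0, 0, [])).2.1
      ∧ (es.foldl (pvStepA3 fuel i) ((parent0, rank0), 0, 0)).2.2
        = ((es.filter (fun t => decide (t.2.2.2 ≠ i))).foldl pvStepB
            (parent0, 0, 0, [])).2.2.1 := by
    intro i
    have hstep : es.foldl (pvStepA3 fuel i) ((parent0, rank0), 0, 0)
        = (es.filter (fun oe => decide (i ≠ oe.2.2.2))).foldl (pvStepA3Body fuel)
            ((parent0, rank0), 0, 0) :=
      PySem.List.foldl_ite_eq_foldl_filter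
        (p := fun oe : Int × Int × Int × Int => i ≠ oe.2.2.2)
        (f := pvStepA3Body fuel) es ((parent0, rank0), 0, 0)
    have hfc : es.filter (fun oe => decide (i ≠ oe.2.2.2))
        = es.filter (fun t => decide (t.2.2.2 ≠ i)) :=
      List.filter_congr (fun x _ => by rw [decide_eq_decide]; exact ne_comm)
    rw [hstep, hfc]
    have hidsf : ∀ e ∈ es.filter (fun t => decide (t.2.2.2 ≠ i)),
        0 ≤ e.1 ∧ e.1 < (parent0.length : Int) ∧
        0 ≤ e.2.1 ∧ e.2.1 < (parent0.length : Int) :=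
      fun e he => hids e (List.mem_of_mem_filter he)
    have hfuelf : 0 + (es.filter (fun t => decide (t.2.2.2 ≠ i))).length + 1 ≤ fuel := by
      have := List.length_filter_le (fun t => decide (t.2.2.2 ≠ i)) es
      rw [hfueldef]
      omega
    exact pvPhase3_bisim fuel _ 0 parent0 rank0 parent0 [] 0 0 hidsf rfl hwf0 hgood0
      hL0 hfuelf
  have hbfseq : ∀ u v : Int,
      pvBfsA (resB.2.2.2.foldl pvAdjStep adj0) v bfsFuel [(u, -1, -1)] 0
          (PySem.Set.ofList [u])
        = pvBfsB (resB.2.2.2.foldl pvAdjStep adj0) v bfsFuel [(u, -1, -1)] := by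
    intro u v
    have := pvBfs_bisim (resB.2.2.2.foldl pvAdjStep adj0) v bfsFuel [(u, -1, -1)] 0
      (PySem.Set.ofList [u]) le_rfl (by simp)
    simpa using this
  have hcontains : ∀ k : Nat,
      PySem.Set.contains (PySem.Set.ofList (resB.2.2.2.map (fun t => t.2.2.2))) (k : Int)
        = resB.2.2.2.any (fun e => e.2.2.2 == (k : Int)) := by
    intro k
    have hiff : PySem.Set.contains
          (PySem.Set.ofList (resB.2.2.2.map (fun t => t.2.2.2))) (k : Int) = true
        ↔ resB.2.2.2.any (fun e => e.2.2.2 == (k : Int)) = true := by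
      constructor
      · intro h
        obtain ⟨e, he, heq⟩ := List.mem_map.mp
          ((PySem.Set.mem_ofList _ _).mp ((PySem.Set.contains_iff _ _).mp h))
        exact List.any_eq_true.mpr ⟨e, he, by simp [heq]⟩
      · intro h
        obtain ⟨e, he, heq⟩ := List.any_eq_true.mp h
        exact (PySem.Set.contains_iff _ _).mpr ((PySem.Set.mem_ofList _ _).mpr
          (List.mem_map.mpr ⟨e, he, by simpa using heq⟩))
    rcases h1 : PySem.Set.contains
        (PySem.Set.ofList (resB.2.2.2.map (fun t => t.2.2.2))) (k : Int) with _ | _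
    · rcases h2 : resB.2.2.2.any (fun e => e.2.2.2 == (k : Int)) with _ | _
      · rw [h1]
      · exact hiff.mpr h2
    · rw [h1]
      exact (hiff.mp h1).symm
  rw [hmst, hw, hadjeq]
  have hrep : PySem.List.pyRepeat ["none"] (edges.length : Int)
      = List.replicate edges.length "none" := by
    rw [PySem.List.pyRepeat_singleton]
    norm_num
  have hlen1 : (es.foldl (fun ans e =>
      if e.2.2.1 = pvBfsA (resB.2.2.2.foldl pvAdjStep adj0) e.2.1 bfsFuel
          [(e.1, -1, -1)] 0 (PySem.Set.ofList [e.1])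
      then PySem.List.pySetD ans e.2.2.2 "at least one" else ans)
      (PySem.List.pyRepeat ["none"] (edges.length : Int))).length = edges.length :=
    (pvFoldSet_length es _ _ _ _).trans (by rw [hrep, List.length_replicate])
  set ans1 := es.foldl (fun ans e =>
      if e.2.2.1 = pvBfsA (resB.2.2.2.foldl pvAdjStep adj0) e.2.1 bfsFuel
          [(e.1, -1, -1)] 0 (PySem.Set.ofList [e.1])
      then PySem.List.pySetD ans e.2.2.2 "at least one" else ans)
      (PySem.List.pyRepeat ["none"] (edges.length : Int)) with hans1
  have hlen2 : (resB.2.2.2.foldl (fun ans e =>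
      if (es.foldl (pvStepA3 fuel e.2.2.2) ((parent0, rank0), 0, 0)).2.2 < n - 1
          ∨ (es.foldl (pvStepA3 fuel e.2.2.2) ((parent0, rank0), 0, 0)).2.1 > resB.2.1
      then PySem.List.pySetD ans e.2.2.2 "any" else ans) ans1).length = edges.length :=
    (pvFoldSet_length resB.2.2.2 _ _ _ _).trans hlen1
  apply List.ext_getElem?
  intro k
  by_cases hk : k < edges.length
  · rw [List.getElem?_map, PySem.List.getElem?_enumerate, List.getElem?_eq_getElem hk]
    simp only [Option.map_some, zero_add]
    have hidxtree : ∀ e ∈ resB.2.2.2, 0 ≤ e.2.2.2 :=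
      fun e he => hidxpos e (htreemem e he)
    have hA2 : (resB.2.2.2.foldl (fun ans e =>
        if (es.foldl (pvStepA3 fuel e.2.2.2) ((parent0, rank0), 0, 0)).2.2 < n - 1
            ∨ (es.foldl (pvStepA3 fuel e.2.2.2) ((parent0, rank0), 0, 0)).2.1 > resB.2.1
        then PySem.List.pySetD ans e.2.2.2 "any" else ans) ans1)[k]?
        = if resB.2.2.2.any (fun e =>
            decide ((es.foldl (pvStepA3 fuel e.2.2.2) ((parent0, rank0), 0, 0)).2.2 < n - 1
              ∨ (es.foldl (pvStepA3 fuel e.2.2.2) ((parent0, rank0), 0, 0)).2.1 > resB.2.1)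
            && (e.2.2.2 == (k : Int))) then some "any" else ans1[k]? :=
      pvFoldSet_getElem? resB.2.2.2 _ _ "any" ans1 k hidxtree (by rw [hlen1]; exact hk)
    have hA1 : ans1[k]?
        = if es.any (fun e =>
            decide (e.2.2.1 = pvBfsA (resB.2.2.2.foldl pvAdjStep adj0) e.2.1 bfsFuel
              [(e.1, -1, -1)] 0 (PySem.Set.ofList [e.1]))
            && (e.2.2.2 == (k : Int))) then some "at least one"
          else (PySem.List.pyRepeat ["none"] (edges.length : Int))[k]? :=
      pvFoldSet_getElem? es _ _ "at least one" _ k hidxpos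
        (by rw [hrep, List.length_replicate]; exact hk)
    have hrepk : (PySem.List.pyRepeat ["none"] (edges.length : Int))[k]? = some "none" := by
      rw [hrep, List.getElem?_replicate, if_pos hk]
    have hany1 : es.any (fun e =>
          decide (e.2.2.1 = pvBfsA (resB.2.2.2.foldl pvAdjStep adj0) e.2.1 bfsFuel
            [(e.1, -1, -1)] 0 (PySem.Set.ofList [e.1]))
          && (e.2.2.2 == (k : Int)))
        = decide (edges[k].2.2 = pvBfsA (resB.2.2.2.foldl pvAdjStep adj0) edges[k].2.1
            bfsFuel [(edges[k].1, -1, -1)] 0 (PySem.Set.ofList [edges[k].1])) := by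
      have h1 : es.any (fun e =>
            decide (e.2.2.1 = pvBfsA (resB.2.2.2.foldl pvAdjStep adj0) e.2.1 bfsFuel
              [(e.1, -1, -1)] 0 (PySem.Set.ofList [e.1]))
            && (e.2.2.2 == (k : Int)))
          = ((PySem.List.enumerate edges).map
              (fun p => (p.2.1, p.2.2.1, p.2.2.2, p.1))).any (fun e =>
            decide (e.2.2.1 = pvBfsA (resB.2.2.2.foldl pvAdjStep adj0) e.2.1 bfsFuel
              [(e.1, -1, -1)] 0 (PySem.Set.ofList [e.1]))
            && (e.2.2.2 == (k : Int))) :=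
        List.Perm.any_eq (PySem.List.sorted_perm _ _ _)
      have h2 : ((PySem.List.enumerate edges).map
            (fun p => (p.2.1, p.2.2.1, p.2.2.2, p.1))).any (fun e =>
            decide (e.2.2.1 = pvBfsA (resB.2.2.2.foldl pvAdjStep adj0) e.2.1 bfsFuel
              [(e.1, -1, -1)] 0 (PySem.Set.ofList [e.1]))
            && (e.2.2.2 == (k : Int)))
          = (PySem.List.enumerate edges).any (fun p =>
            decide (p.2.2.2 = pvBfsA (resB.2.2.2.foldl pvAdjStep adj0) p.2.2.1 bfsFuel
              [(p.2.1, -1, -1)] 0 (PySem.Set.ofList [p.2.1]))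
            && (p.1 == (k : Int))) := List.any_map
      have h3 := pvEnumAny edges k hk (fun p =>
        decide (p.2.2.2 = pvBfsA (resB.2.2.2.foldl pvAdjStep adj0) p.2.2.1 bfsFuel
          [(p.2.1, -1, -1)] 0 (PySem.Set.ofList [p.2.1])))
      exact h1.trans (h2.trans h3)
    have hany2 : resB.2.2.2.any (fun e =>
          decide ((es.foldl (pvStepA3 fuel e.2.2.2) ((parent0, rank0), 0, 0)).2.2 < n - 1
            ∨ (es.foldl (pvStepA3 fuel e.2.2.2) ((parent0, rank0), 0, 0)).2.1 > resB.2.1)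
          && (e.2.2.2 == (k : Int)))
        = (decide ((es.foldl (pvStepA3 fuel (k : Int)) ((parent0, rank0), 0, 0)).2.2 < n - 1
            ∨ (es.foldl (pvStepA3 fuel (k : Int)) ((parent0, rank0), 0, 0)).2.1 > resB.2.1)
          && resB.2.2.2.any (fun e => e.2.2.2 == (k : Int))) := by
      apply pvAnyAndConst
      intro e _ hbe
      have heq : e.2.2.2 = (k : Int) := by simpa using hbe
      rw [heq]
    have hQeq : decide ((es.foldl (pvStepA3 fuel (k : Int)) ((parent0, rank0), 0, 0)).2.2
          < n - 1
          ∨ (es.foldl (pvStepA3 fuel (k : Int)) ((parent0, rank0), 0, 0)).2.1 > resB.2.1)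
        = decide (((es.filter (fun t => decide (t.2.2.2 ≠ (k : Int)))).foldl pvStepB
              (parent0, 0, 0, [])).2.2.1 < n - 1
            ∨ ((es.filter (fun t => decide (t.2.2.2 ≠ (k : Int)))).foldl pvStepB
              (parent0, 0, 0, [])).2.1 > resB.2.1) := by
      rw [(hreruns (k : Int)).1, (hreruns (k : Int)).2]
    rw [hA2, hA1, hrepk, hany1, hany2, hQeq, hbfseq, hcontains k]
    by_cases hT : resB.2.2.2.any (fun e => e.2.2.2 == (k : Int)) = true
    · by_cases hQ : ((es.filter (fun t => decide (t.2.2.2 ≠ (k : Int)))).foldl pvStepB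
            (parent0, 0, 0, [])).2.2.1 < n - 1
          ∨ ((es.filter (fun t => decide (t.2.2.2 ≠ (k : Int)))).foldl pvStepB
            (parent0, 0, 0, [])).2.1 > resB.2.1
      · simp only [hT, hQ, Bool.and_true, decide_true, if_true]
      · by_cases hP : edges[k].2.2 = pvBfsB (resB.2.2.2.foldl pvAdjStep adj0)
            edges[k].2.1 bfsFuel [(edges[k].1, -1, -1)]
        · simp [hT, hP]
          split <;> rfl
        · simp [hT, hP]
          split <;> rfl
    · have hT' : resB.2.2.2.any (fun e => e.2.2.2 == (k : Int)) = false :=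
        eq_false_of_ne_true hT
      by_cases hP : edges[k].2.2 = pvBfsB (resB.2.2.2.foldl pvAdjStep adj0)
          edges[k].2.1 bfsFuel [(edges[k].1, -1, -1)]
      · simp [hT', hP]
      · simp [hT', hP]
  · have hk1 : edges.length ≤ k := by omega
    have hbl : ((PySem.List.enumerate edges).map (fun p =>
        if PySem.Set.contains (PySem.Set.ofList (resB.2.2.2.map (fun t => t.2.2.2))) p.1
        then
          if ((es.filter (fun t => decide (t.2.2.2 ≠ p.1))).foldl pvStepB
                (parent0, 0, 0, [])).2.2.1 < n - 1
              ∨ ((es.filter (fun t => decide (t.2.2.2 ≠ p.1))).foldl pvStepB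
                (parent0, 0, 0, [])).2.1 > resB.2.1 then "any"
          else if p.2.2.2 = pvBfsB (resB.2.2.2.foldl pvAdjStep adj0) p.2.2.1 bfsFuel
              [(p.2.1, -1, -1)] then "at least one"
          else "none"
        else if p.2.2.2 = pvBfsB (resB.2.2.2.foldl pvAdjStep adj0) p.2.2.1 bfsFuel
            [(p.2.1, -1, -1)] then "at least one"
        else "none")).length = edges.length := by
      rw [List.length_map, PySem.List.length_enumerate]
    rw [List.getElem?_eq_none (hlen2.symm ▸ hk1), List.getElem?_eq_none (hbl.symm ▸ hk1)]
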